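-- pv_equiv track=rewrite | github.com/bilalz5-github/Dijkstra-s-algorithm | Problemthree.py | find_most_profitable_path
-- ===== SOURCE A (Python) =====
-- def find_most_profitable_path(matrix):
--     n = len(matrix)
--     if n == 0:
--         return [], 0
--
--     # Initialize a table to store the maximum profit values
--     dp = [[0] * n for _ in range(n)]
--
--     # Fill in the table
--     for i in range(n):
--         for j in range(n):
--             if i == 0 and j == 0:
--                 dp[i][j] = matrix[i][j]
--             elif i == 0:
--                 dp[i][j] = dp[i][j - 1] + matrix[i][j]
--             elif j == 0:
--                 dp[i][j] = dp[i - 1][j] + matrix[i][j]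
--             else:
--                 dp[i][j] = max(dp[i - 1][j], dp[i][j - 1]) + matrix[i][j]
--
--     # Traceback to find the path
--     path = []
--     i, j = n - 1, n - 1
--     while i > 0 or j > 0:
--         path.insert(0, (i, j))
--         if i == 0:
--             j -= 1
--         elif j == 0:
--             i -= 1
--         else:
--             if dp[i - 1][j] > dp[i][j - 1]:
--                 i -= 1
--             else:
--                 j -= 1
--
--     path.insert(0, (0, 0))
--
--     # Mark the path with '*' and the rest with '-'
--     for i, j in path:
--         matrix[i][j] = '*'
--     for i in range(n):
--         for j in range(n):
--             if matrix[i][j] != '*':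
--                 matrix[i][j] = '-'
--
--     return matrix, dp[n - 1][n - 1]
-- ===== SOURCE B (Python) =====
-- # Forward path propagation with a rolling dp row: instead of storing the full dp
-- # table and walking backwards from (n-1,n-1), B keeps only the previous row's dp
-- # values together with, for every cell, the best path reaching it, built forward.
-- # There is no traceback phase and no stored dp matrix.
-- # Note: unlike A, B does not mutate its argument in place; the return value is identical.
-- def find_most_profitable_path(matrix):
--     n = len(matrix)
--     if n == 0:
--         return [], 0
--
--     prev_dp = []
--     prev_paths = []
--     for i in range(n):
--         cur_dp = []
--         cur_paths = []
--         for j in range(n):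
--             if i == 0 and j == 0:
--                 v, p = matrix[0][0], []
--             elif i == 0:
--                 v, p = cur_dp[j - 1] + matrix[i][j], cur_paths[j - 1]
--             elif j == 0:
--                 v, p = prev_dp[j] + matrix[i][j], prev_paths[j]
--             elif prev_dp[j] > cur_dp[j - 1]:
--                 v, p = prev_dp[j] + matrix[i][j], prev_paths[j]
--             else:
--                 v, p = cur_dp[j - 1] + matrix[i][j], cur_paths[j - 1]
--             cur_dp.append(v)
--             cur_paths.append(p + [(i, j)])
--         prev_dp, prev_paths = cur_dp, cur_paths
--
--     cells = set(prev_paths[n - 1])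
--     out = [['*' if (i, j) in cells else '-' for j in range(n)] for i in range(n)]
--     return out, prev_dp[n - 1]
-- ===== Notes on version B (the rewrite author's own statement) =====
-- stated objective: alternative
-- what changed: B propagates the best path forward during the DP (keeping only a rolling previous dp row plus a best-path list per cell) and reads the answer off the last row, eliminating A's stored n-by-n dp table and its backward traceback loop; the '*'/'-' grid is built fresh from a set of path cells instead of mutating the input in place.
-- outside the precondition, e.g. on find_most_profitable_path([[1, 2]]): A returns ([['*', 2]], 1), B returns ([['*']], 1)
import Mathlib
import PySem

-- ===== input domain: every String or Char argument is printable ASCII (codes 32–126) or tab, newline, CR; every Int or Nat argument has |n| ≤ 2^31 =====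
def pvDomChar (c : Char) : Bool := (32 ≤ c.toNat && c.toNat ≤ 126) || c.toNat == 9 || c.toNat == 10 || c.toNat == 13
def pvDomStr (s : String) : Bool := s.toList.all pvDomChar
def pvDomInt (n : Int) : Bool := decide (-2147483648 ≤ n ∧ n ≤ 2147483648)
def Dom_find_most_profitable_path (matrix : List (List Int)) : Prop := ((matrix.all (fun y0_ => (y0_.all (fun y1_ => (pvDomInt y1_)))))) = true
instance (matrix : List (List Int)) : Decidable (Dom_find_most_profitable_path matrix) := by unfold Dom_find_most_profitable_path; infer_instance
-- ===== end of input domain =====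

-- B propagates the best path forward during the DP (rolling previous dp row plus a
-- best-path list per cell) and reads the answer off the last row; A stores the full
-- dp table and walks backwards from (n-1, n-1).  Return values agree; A additionally
-- mutates its argument in place, B does not (the equivalence proved is about the
-- return value).

-- ===== PORT A =====
-- Port notes: Python preallocates each dp row with zeros and fills it left to right;
-- appending cell by cell builds the same rows (indices read are always already
-- written, so getD with default 0 is exact).  In the marking phase the original int
-- entries are only ever compared against '*' (an int is never equal to '*'); they
-- are modelled as `none` and the '*' marks as `some "*"`, exact for every comparison
-- the Python makes.
def pvMGet (m : List (List Int)) (i j : Nat) : Int := (m.getD i []).getD j 0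

def pvRowA (matrix dp : List (List Int)) (i n : Nat) : List Int :=
  (List.range n).foldl (fun acc j =>
    acc ++ [if i = 0 ∧ j = 0 then pvMGet matrix 0 0
            else if i = 0 then acc.getD (j - 1) 0 + pvMGet matrix i j
            else if j = 0 then pvMGet dp (i - 1) j + pvMGet matrix i j
            else max (pvMGet dp (i - 1) j) (acc.getD (j - 1) 0) + pvMGet matrix i j]) []

def pvDpA (matrix : List (List Int)) (n : Nat) : List (List Int) :=
  (List.range n).foldl (fun dp i => dp ++ [pvRowA matrix dp i n]) []

-- the while loop, recursion on i + j (each iteration decreases i + j by one)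
def pvTraceA (dp : List (List Int)) : Nat → Nat → List (Nat × Nat)
  | 0, 0 => [(0, 0)]
  | 0, j + 1 => pvTraceA dp 0 j ++ [(0, j + 1)]
  | i + 1, 0 => pvTraceA dp i 0 ++ [(i + 1, 0)]
  | i + 1, j + 1 =>
    if pvMGet dp i (j + 1) > pvMGet dp (i + 1) j
    then pvTraceA dp i (j + 1) ++ [(i + 1, j + 1)]
    else pvTraceA dp (i + 1) j ++ [(i + 1, j + 1)]
  termination_by i j => i + j

def pvSet2d (g : List (List (Option String))) (i j : Nat) (v : Option String) :
    List (List (Option String)) := g.set i ((g.getD i []).set j v)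

def find_most_profitable_path (matrix : List (List Int)) : List (List String) × Int :=
  let n := matrix.length
  if n = 0 then ([], 0) else
  let dp := pvDpA matrix n
  let path := pvTraceA dp (n - 1) (n - 1)
  let g0 : List (List (Option String)) := matrix.map (fun r => r.map (fun _ => none))
  let g1 := path.foldl (fun g p => pvSet2d g p.1 p.2 (some "*")) g0
  let out := (List.range n).map (fun i => (List.range n).map (fun j =>
    if (g1.getD i []).getD j none ≠ some "*" then "-" else "*"))
  (out, pvMGet dp (n - 1) (n - 1))

-- ===== PORT B =====
-- One outer row step of Source B: st = (prev_dp, prev_paths); the inner fold carries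
-- (cur_dp, cur_paths).  Source B's in-range indexing cur_dp[j-1] / prev_dp[j] is exact
-- as getD (the read index is always already written).
def pvStepB (matrix : List (List Int)) (n : Nat)
    (st : List Int × List (List (Nat × Nat))) (i : Nat) :
    List Int × List (List (Nat × Nat)) :=
  (List.range n).foldl
    (fun (p : List Int × List (List (Nat × Nat))) j =>
      let vp :=
        if i = 0 ∧ j = 0 then (pvMGet matrix 0 0, ([] : List (Nat × Nat)))
        else if i = 0 then (p.1.getD (j - 1) 0 + pvMGet matrix i j, p.2.getD (j - 1) [])
        else if j = 0 then (st.1.getD j 0 + pvMGet matrix i j, st.2.getD j [])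
        else if st.1.getD j 0 > p.1.getD (j - 1) 0 then
          (st.1.getD j 0 + pvMGet matrix i j, st.2.getD j [])
        else (p.1.getD (j - 1) 0 + pvMGet matrix i j, p.2.getD (j - 1) [])
      (p.1 ++ [vp.1], p.2 ++ [vp.2 ++ [(i, j)]]))
    ([], [])

def find_most_profitable_path_alt (matrix : List (List Int)) : List (List String) × Int :=
  let n := matrix.length
  if n = 0 then ([], 0) else
  let fin := (List.range n).foldl (pvStepB matrix n) ([], [])
  let cells : PySem.Set (Nat × Nat) := PySem.Set.ofList (fin.2.getD (n - 1) [])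
  let out := (List.range n).map (fun i => (List.range n).map (fun j =>
    if (i, j) ∈ cells then "*" else "-"))
  (out, fin.1.getD (n - 1) 0)

-- ===== PRECONDITION & SPEC =====
-- Pre_ excludes ragged matrices: on a row shorter than len(matrix) the Python A
-- raises IndexError, and on a row longer than len(matrix) A returns a matrix still
-- containing ints next to the '*'/'-' strings, which is not a value of the declared
-- List (List String) type.
def Pre_find_most_profitable_path (matrix : List (List Int)) : Prop :=
  ∀ row ∈ matrix, row.length = matrix.length
instance (matrix : List (List Int)) : Decidable (Pre_find_most_profitable_path matrix) := by
  unfold Pre_find_most_profitable_path; infer_instance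

def pvWitness_find_most_profitable_path : List (List Int) := [[1, 2], [3, 4]]

def Spec_find_most_profitable_path (matrix : List (List Int)) (out : List (List String) × Int) : Prop := out = find_most_profitable_path_alt matrix
instance (matrix : List (List Int)) (out : List (List String) × Int) : Decidable (Spec_find_most_profitable_path matrix out) := by unfold Spec_find_most_profitable_path; infer_instance

-- ===== CLAIM (what is proved, stated in full; the proofs are below) =====
def Claim_equal_find_most_profitable_path : Prop := ∀ (matrix : List (List Int)), Dom_find_most_profitable_path matrix → Pre_find_most_profitable_path matrix → Spec_find_most_profitable_path matrix (find_most_profitable_path matrix)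

-- ===== LEMMAS AND PROOFS =====

-- generic facts -------------------------------------------------------------------

theorem pv_appfold_length {α δ : Type} (g : List α → δ → α) (l : List δ) (init : List α) :
    (l.foldl (fun a x => a ++ [g a x]) init).length = init.length + l.length := by
  induction l generalizing init with
  | nil => simp
  | cons x t ih => simp [ih]; omega

theorem pv_getD_prefix {α : Type} {l1 l2 : List α} (h : l1 <+: l2) {k : Nat}
    (hk : k < l1.length) (d : α) : l2.getD k d = l1.getD k d := by
  obtain ⟨t, rfl⟩ := h
  simp [List.getD, List.getElem?_append_left hk]

theorem pv_range_foldl_succ {α : Type} (f : α → Nat → α) (init : α) (k : Nat) :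
    (List.range (k + 1)).foldl f init = f ((List.range k).foldl f init) k := by
  rw [List.range_succ, List.foldl_append]; rfl

theorem pv_getD_map_range {α : Type} (f : Nat → α) {j n : Nat} (h : j < n) (d : α) :
    ((List.range n).map f).getD j d = f j := by
  rw [List.getD, List.getElem?_map]
  simp [List.getElem?_range h]

-- partial dp table of A ------------------------------------------------------------

def pvDpPart (matrix : List (List Int)) (n k : Nat) : List (List Int) :=
  (List.range k).foldl (fun dp i => dp ++ [pvRowA matrix dp i n]) []

theorem pvDpA_eq_part (matrix : List (List Int)) (n : Nat) :
    pvDpA matrix n = pvDpPart matrix n n := rfl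

theorem pvDpPart_succ (matrix : List (List Int)) (n k : Nat) :
    pvDpPart matrix n (k + 1) =
      pvDpPart matrix n k ++ [pvRowA matrix (pvDpPart matrix n k) k n] := by
  unfold pvDpPart
  exact pv_range_foldl_succ _ _ _

theorem pvDpPart_length (matrix : List (List Int)) (n k : Nat) :
    (pvDpPart matrix n k).length = k := by
  unfold pvDpPart
  rw [pv_appfold_length (fun dp i => pvRowA matrix dp i n)]
  simp

theorem pvDpPart_prefix (matrix : List (List Int)) (n : Nat) {k m : Nat} (h : k ≤ m) :
    pvDpPart matrix n k <+: pvDpPart matrix n m := by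
  induction m with
  | zero => have : k = 0 := by omega
            subst this; exact List.prefix_rfl
  | succ m ih =>
    have h' : k ≤ m ∨ k = m + 1 := by omega
    rcases h' with h' | rfl
    · exact (ih h').trans (by rw [pvDpPart_succ]; exact List.prefix_append _ _)
    · exact List.prefix_rfl

theorem pvDpA_row (matrix : List (List Int)) {n i : Nat} (hi : i < n) :
    (pvDpA matrix n).getD i [] = pvRowA matrix (pvDpPart matrix n i) i n := by
  have hpre : pvDpPart matrix n (i + 1) <+: pvDpA matrix n := by
    rw [pvDpA_eq_part]; exact pvDpPart_prefix matrix n hi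
  have hlt : i < (pvDpPart matrix n (i + 1)).length := by
    rw [pvDpPart_length]; omega
  rw [pv_getD_prefix hpre hlt, pvDpPart_succ]
  have hl := pvDpPart_length matrix n i
  simp [List.getD, hl]

theorem pvMGet_part (matrix : List (List Int)) {n k i : Nat} (hik : i < k) (hk : k ≤ n)
    (j : Nat) : pvMGet (pvDpPart matrix n k) i j = pvMGet (pvDpA matrix n) i j := by
  have hpre : pvDpPart matrix n k <+: pvDpA matrix n := by
    rw [pvDpA_eq_part]; exact pvDpPart_prefix matrix n hk
  have hlt : i < (pvDpPart matrix n k).length := by rw [pvDpPart_length]; omega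
  unfold pvMGet
  rw [pv_getD_prefix hpre hlt]

-- partial dp row of A --------------------------------------------------------------

def pvRowPart (matrix dp : List (List Int)) (i n k : Nat) : List Int :=
  (List.range k).foldl (fun acc j =>
    acc ++ [if i = 0 ∧ j = 0 then pvMGet matrix 0 0
            else if i = 0 then acc.getD (j - 1) 0 + pvMGet matrix i j
            else if j = 0 then pvMGet dp (i - 1) j + pvMGet matrix i j
            else max (pvMGet dp (i - 1) j) (acc.getD (j - 1) 0) + pvMGet matrix i j]) []

theorem pvRowA_eq_part (matrix dp : List (List Int)) (i n : Nat) :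
    pvRowA matrix dp i n = pvRowPart matrix dp i n n := rfl

theorem pvRowPart_length (matrix dp : List (List Int)) (i n k : Nat) :
    (pvRowPart matrix dp i n k).length = k := by
  unfold pvRowPart
  rw [pv_appfold_length]
  simp

theorem pvRowPart_prefix (matrix dp : List (List Int)) (i n : Nat) {k m : Nat} (h : k ≤ m) :
    pvRowPart matrix dp i n k <+: pvRowPart matrix dp i n m := by
  induction m with
  | zero => have : k = 0 := by omega
            subst this; exact List.prefix_rfl
  | succ m ih =>
    have h' : k ≤ m ∨ k = m + 1 := by omega
    rcases h' with h' | rfl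
    · refine (ih h').trans ?_
      unfold pvRowPart
      rw [pv_range_foldl_succ]
      exact List.prefix_append _ _
    · exact List.prefix_rfl

theorem pvRowPart_getD (matrix dp : List (List Int)) (i n : Nat) {k m j : Nat}
    (hjk : j < k) (hkm : k ≤ m) :
    (pvRowPart matrix dp i n k).getD j 0 = (pvRowPart matrix dp i n m).getD j 0 := by
  have := pvRowPart_prefix matrix dp i n hkm
  rw [pv_getD_prefix this (by rw [pvRowPart_length]; omega)]

-- element-wise characterization of A's dp row --------------------------------------

theorem pvRowA_getD (matrix dp : List (List Int)) (i n : Nat) {j : Nat} (hj : j < n) :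
    (pvRowA matrix dp i n).getD j 0 =
      if i = 0 ∧ j = 0 then pvMGet matrix 0 0
      else if i = 0 then (pvRowA matrix dp i n).getD (j - 1) 0 + pvMGet matrix i j
      else if j = 0 then pvMGet dp (i - 1) j + pvMGet matrix i j
      else max (pvMGet dp (i - 1) j) ((pvRowA matrix dp i n).getD (j - 1) 0) +
             pvMGet matrix i j := by
  have h1 : (pvRowA matrix dp i n).getD j 0 = (pvRowPart matrix dp i n (j + 1)).getD j 0 := by
    rw [pvRowA_eq_part]
    exact (pvRowPart_getD matrix dp i n (Nat.lt_succ_self j) hj).symm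
  have h2 : pvRowPart matrix dp i n (j + 1) =
      pvRowPart matrix dp i n j ++
        [if i = 0 ∧ j = 0 then pvMGet matrix 0 0
         else if i = 0 then (pvRowPart matrix dp i n j).getD (j - 1) 0 + pvMGet matrix i j
         else if j = 0 then pvMGet dp (i - 1) j + pvMGet matrix i j
         else max (pvMGet dp (i - 1) j) ((pvRowPart matrix dp i n j).getD (j - 1) 0) +
                pvMGet matrix i j] := by
    unfold pvRowPart
    rw [pv_range_foldl_succ]
  have hl := pvRowPart_length matrix dp i n j
  have h3 : ∀ x : Int, (pvRowPart matrix dp i n j ++ [x]).getD j 0 = x := by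
    intro x
    simp [List.getD, hl]
  have h4 : j ≠ 0 → (pvRowPart matrix dp i n j).getD (j - 1) 0 =
      (pvRowA matrix dp i n).getD (j - 1) 0 := by
    intro hj0
    rw [pvRowA_eq_part]
    exact pvRowPart_getD matrix dp i n (by omega) (by omega)
  rw [h1, h2, h3]
  by_cases hj0 : j = 0
  · by_cases hi : i = 0 <;> simp [hj0, hi]
  · rw [h4 hj0]

-- the dp recurrence in terms of the final table ------------------------------------

theorem pv_dp00 (matrix : List (List Int)) {n : Nat} (hn : 0 < n) :
    pvMGet (pvDpA matrix n) 0 0 = pvMGet matrix 0 0 := by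
  show ((pvDpA matrix n).getD 0 []).getD 0 0 = _
  rw [pvDpA_row matrix hn, pvRowA_getD matrix _ 0 n hn]
  simp

theorem pv_dp0j (matrix : List (List Int)) {n j : Nat} (hj : j + 1 < n) :
    pvMGet (pvDpA matrix n) 0 (j + 1) = pvMGet (pvDpA matrix n) 0 j + pvMGet matrix 0 (j + 1) := by
  show ((pvDpA matrix n).getD 0 []).getD (j + 1) 0 = _
  rw [pvDpA_row matrix (by omega), pvRowA_getD matrix _ 0 n hj]
  simp only [Nat.add_sub_cancel]
  rw [← pvDpA_row matrix (show 0 < n by omega)]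
  simp [pvMGet]

theorem pv_dpi0 (matrix : List (List Int)) {n i : Nat} (hi : i + 1 < n) :
    pvMGet (pvDpA matrix n) (i + 1) 0 = pvMGet (pvDpA matrix n) i 0 + pvMGet matrix (i + 1) 0 := by
  show ((pvDpA matrix n).getD (i + 1) []).getD 0 0 = _
  rw [pvDpA_row matrix hi, pvRowA_getD matrix _ (i + 1) n (show 0 < n by omega)]
  simp only [Nat.add_sub_cancel]
  rw [pvMGet_part matrix (Nat.lt_succ_self i) (by omega)]
  simp

theorem pv_dpij (matrix : List (List Int)) {n i j : Nat} (hi : i + 1 < n) (hj : j + 1 < n) :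
    pvMGet (pvDpA matrix n) (i + 1) (j + 1) =
      max (pvMGet (pvDpA matrix n) i (j + 1)) (pvMGet (pvDpA matrix n) (i + 1) j) +
        pvMGet matrix (i + 1) (j + 1) := by
  show ((pvDpA matrix n).getD (i + 1) []).getD (j + 1) 0 = _
  rw [pvDpA_row matrix hi, pvRowA_getD matrix _ (i + 1) n hj]
  simp only [Nat.add_sub_cancel]
  rw [pvMGet_part matrix (Nat.lt_succ_self i) (by omega)]
  rw [← pvDpA_row matrix hi]
  simp [pvMGet]

-- B's row step produces A's dp row and the traceback path of every cell ------------

def pvInnerGo (matrix : List (List Int)) (n i : Nat)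
    (st : List Int × List (List (Nat × Nat))) (k : Nat) :
    List Int × List (List (Nat × Nat)) :=
  (List.range k).foldl
    (fun (p : List Int × List (List (Nat × Nat))) j =>
      let vp :=
        if i = 0 ∧ j = 0 then (pvMGet matrix 0 0, ([] : List (Nat × Nat)))
        else if i = 0 then (p.1.getD (j - 1) 0 + pvMGet matrix i j, p.2.getD (j - 1) [])
        else if j = 0 then (st.1.getD j 0 + pvMGet matrix i j, st.2.getD j [])
        else if st.1.getD j 0 > p.1.getD (j - 1) 0 then
          (st.1.getD j 0 + pvMGet matrix i j, st.2.getD j [])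
        else (p.1.getD (j - 1) 0 + pvMGet matrix i j, p.2.getD (j - 1) [])
      (p.1 ++ [vp.1], p.2 ++ [vp.2 ++ [(i, j)]]))
    ([], [])

theorem pvStepB_eq_go (matrix : List (List Int)) (n : Nat)
    (st : List Int × List (List (Nat × Nat))) (i : Nat) :
    pvStepB matrix n st i = pvInnerGo matrix n i st n := rfl

theorem pvInnerGo_succ (matrix : List (List Int)) (n i : Nat)
    (st : List Int × List (List (Nat × Nat))) (k : Nat) :
    pvInnerGo matrix n i st (k + 1) =
      (let p := pvInnerGo matrix n i st k
       let vp :=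
        if i = 0 ∧ k = 0 then (pvMGet matrix 0 0, ([] : List (Nat × Nat)))
        else if i = 0 then (p.1.getD (k - 1) 0 + pvMGet matrix i k, p.2.getD (k - 1) [])
        else if k = 0 then (st.1.getD k 0 + pvMGet matrix i k, st.2.getD k [])
        else if st.1.getD k 0 > p.1.getD (k - 1) 0 then
          (st.1.getD k 0 + pvMGet matrix i k, st.2.getD k [])
        else (p.1.getD (k - 1) 0 + pvMGet matrix i k, p.2.getD (k - 1) [])
       (p.1 ++ [vp.1], p.2 ++ [vp.2 ++ [(i, k)]])) := by
  unfold pvInnerGo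
  rw [pv_range_foldl_succ]

theorem pvInnerGo_spec (matrix : List (List Int)) (n i : Nat) (hi : i < n)
    (st : List Int × List (List (Nat × Nat)))
    (hst : i ≠ 0 →
      st = ((List.range n).map (fun j => pvMGet (pvDpA matrix n) (i - 1) j),
            (List.range n).map (fun j => pvTraceA (pvDpA matrix n) (i - 1) j))) :
    ∀ k, k ≤ n →
      pvInnerGo matrix n i st k =
        ((List.range k).map (fun j => pvMGet (pvDpA matrix n) i j),
         (List.range k).map (fun j => pvTraceA (pvDpA matrix n) i j)) := by
  intro k
  induction k with
  | zero => intro _; rfl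
  | succ k ih =>
    intro hk
    rw [pvInnerGo_succ, ih (by omega)]
    dsimp only
    have hsplitI : ∀ (m : Nat), (List.range (m + 1)).map (fun j => pvMGet (pvDpA matrix n) i j) =
        (List.range m).map (fun j => pvMGet (pvDpA matrix n) i j) ++
          [pvMGet (pvDpA matrix n) i m] := by
      intro m; rw [List.range_succ, List.map_append]; rfl
    have hsplitT : ∀ (m : Nat), (List.range (m + 1)).map (fun j => pvTraceA (pvDpA matrix n) i j) =
        (List.range m).map (fun j => pvTraceA (pvDpA matrix n) i j) ++
          [pvTraceA (pvDpA matrix n) i m] := by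
      intro m; rw [List.range_succ, List.map_append]; rfl
    rw [hsplitI k, hsplitT k]
    by_cases hi0 : i = 0
    · subst hi0
      by_cases hk0 : k = 0
      · subst hk0
        rw [if_pos ⟨rfl, rfl⟩]
        rw [pv_dp00 matrix (by omega),
            show pvTraceA (pvDpA matrix n) 0 0 = [(0, 0)] from by rw [pvTraceA]]
        simp
      · obtain ⟨s, rfl⟩ := Nat.exists_eq_succ_of_ne_zero hk0
        rw [if_neg (by omega), if_pos rfl]
        dsimp only
        simp only [Nat.succ_sub_one]
        rw [pv_getD_map_range (fun j => pvMGet (pvDpA matrix n) 0 j) (Nat.lt_succ_self s) 0,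
            pv_getD_map_range (fun j => pvTraceA (pvDpA matrix n) 0 j) (Nat.lt_succ_self s) []]
        rw [pv_dp0j matrix (by omega),
            show pvTraceA (pvDpA matrix n) 0 (s + 1) =
              pvTraceA (pvDpA matrix n) 0 s ++ [(0, s + 1)] from by rw [pvTraceA]]
    · obtain ⟨t, rfl⟩ := Nat.exists_eq_succ_of_ne_zero hi0
      have hstv := hst (by omega)
      by_cases hk0 : k = 0
      · subst hk0
        rw [if_neg (by omega), if_neg (by omega), if_pos rfl]
        rw [hstv]
        dsimp only
        simp only [Nat.succ_sub_one]
        rw [pv_getD_map_range (fun j => pvMGet (pvDpA matrix n) t j) (show 0 < n by omega) 0,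
            pv_getD_map_range (fun j => pvTraceA (pvDpA matrix n) t j) (show 0 < n by omega) []]
        rw [pv_dpi0 matrix (by omega),
            show pvTraceA (pvDpA matrix n) (t + 1) 0 =
              pvTraceA (pvDpA matrix n) t 0 ++ [(t + 1, 0)] from by rw [pvTraceA]]
      · obtain ⟨s, rfl⟩ := Nat.exists_eq_succ_of_ne_zero hk0
        rw [if_neg (by omega), if_neg (by omega), if_neg (by omega)]
        rw [hstv]
        dsimp only
        simp only [Nat.succ_sub_one]
        rw [pv_getD_map_range (fun j => pvMGet (pvDpA matrix n) t j) (show s + 1 < n by omega) 0,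
            pv_getD_map_range (fun j => pvTraceA (pvDpA matrix n) t j) (show s + 1 < n by omega) [],
            pv_getD_map_range (fun j => pvMGet (pvDpA matrix n) (t + 1) j) (Nat.lt_succ_self s) 0,
            pv_getD_map_range (fun j => pvTraceA (pvDpA matrix n) (t + 1) j) (Nat.lt_succ_self s) []]
        by_cases hc : pvMGet (pvDpA matrix n) t (s + 1) > pvMGet (pvDpA matrix n) (t + 1) s
        · rw [if_pos hc]
          rw [show pvTraceA (pvDpA matrix n) (t + 1) (s + 1) =
                pvTraceA (pvDpA matrix n) t (s + 1) ++ [(t + 1, s + 1)] from by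
            rw [pvTraceA]; rw [if_pos hc]]
          rw [pv_dpij matrix (by omega) (by omega)]
          rw [show max (pvMGet (pvDpA matrix n) t (s + 1)) (pvMGet (pvDpA matrix n) (t + 1) s) =
                pvMGet (pvDpA matrix n) t (s + 1) from by omega]
        · rw [if_neg hc]
          rw [show pvTraceA (pvDpA matrix n) (t + 1) (s + 1) =
                pvTraceA (pvDpA matrix n) (t + 1) s ++ [(t + 1, s + 1)] from by
            rw [pvTraceA]; rw [if_neg hc]]
          rw [pv_dpij matrix (by omega) (by omega)]
          rw [show max (pvMGet (pvDpA matrix n) t (s + 1)) (pvMGet (pvDpA matrix n) (t + 1) s) =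
                pvMGet (pvDpA matrix n) (t + 1) s from by omega]

theorem pvBuildB_rows (matrix : List (List Int)) (n : Nat) :
    ∀ i, i ≤ n → i ≠ 0 →
      (List.range i).foldl (pvStepB matrix n) ([], []) =
        ((List.range n).map (fun j => pvMGet (pvDpA matrix n) (i - 1) j),
         (List.range n).map (fun j => pvTraceA (pvDpA matrix n) (i - 1) j)) := by
  intro i
  induction i with
  | zero => intro _ h; exact absurd rfl h
  | succ i ih =>
    intro hi _
    rw [pv_range_foldl_succ]
    by_cases hi0 : i = 0
    · subst hi0
      simp only [List.range_zero, List.foldl_nil]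
      rw [pvStepB_eq_go]
      exact pvInnerGo_spec matrix n 0 (by omega) ([], []) (fun h => absurd rfl h) n (le_refl n)
    · rw [ih (by omega) hi0, pvStepB_eq_go]
      have := pvInnerGo_spec matrix n i (by omega)
        ((List.range n).map (fun j => pvMGet (pvDpA matrix n) (i - 1) j),
         (List.range n).map (fun j => pvTraceA (pvDpA matrix n) (i - 1) j))
        (fun _ => rfl) n (le_refl n)
      rw [this]
      simp

-- bounds of the path ---------------------------------------------------------------

theorem pvTraceA_bounds (dp : List (List Int)) :
    ∀ i j, ∀ p ∈ pvTraceA dp i j, p.1 ≤ i ∧ p.2 ≤ j := by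
  intro i j
  induction i, j using pvTraceA.induct dp with
  | case1 =>
    intro p hp
    rw [pvTraceA] at hp
    simp at hp
    simp [hp]
  | case2 j ih =>
    intro p hp
    rw [pvTraceA] at hp
    rcases List.mem_append.1 hp with h | h
    · have := ih p h; omega
    · simp at h; simp [h]
  | case3 i ih =>
    intro p hp
    rw [pvTraceA] at hp
    rcases List.mem_append.1 hp with h | h
    · have := ih p h; omega
    · simp at h; simp [h]
  | case4 i j hc ih =>
    intro p hp
    rw [pvTraceA, if_pos hc] at hp
    rcases List.mem_append.1 hp with h | h
    · have := ih p h; omega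
    · simp at h; simp [h]
  | case5 i j hc ih =>
    intro p hp
    rw [pvTraceA, if_neg hc] at hp
    rcases List.mem_append.1 hp with h | h
    · have := ih p h; omega
    · simp at h; simp [h]

-- marking --------------------------------------------------------------------------

def pvCellG (g : List (List (Option String))) (i j : Nat) : Option String :=
  (g.getD i []).getD j none

theorem pvSet2d_cell (g : List (List (Option String))) {n a b i j : Nat}
    (hg : g.length = n) (hr : ∀ r ∈ g, r.length = n)
    (ha : a < n) (hb : b < n) (hi : i < n) (hj : j < n) (v : Option String) :
    pvCellG (pvSet2d g a b v) i j = if a = i ∧ b = j then v else pvCellG g i j := by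
  have hrowa : (g.getD a []).length = n := by
    have ha' : a < g.length := by omega
    rw [List.getD, List.getElem?_eq_getElem ha']
    exact hr _ (List.getElem_mem ha')
  have houter : (pvSet2d g a b v).getD i [] =
      if a = i then (g.getD a []).set b v else g.getD i [] := by
    unfold pvSet2d
    by_cases hai : a = i
    · subst hai
      simp [List.getD_eq_getElem?_getD, List.getElem?_set_self (show a < g.length by omega)]
    · simp [List.getD_eq_getElem?_getD, List.getElem?_set_ne hai, hai]
  unfold pvCellG
  rw [houter]
  by_cases hai : a = i
  · subst hai
    rw [if_pos rfl]
    simp only [true_and]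
    by_cases hbj : b = j
    · subst hbj
      rw [List.getD_eq_getElem?_getD, List.getElem?_set_self (show b < (g.getD a []).length by omega)]
      simp
    · rw [List.getD_eq_getElem?_getD, List.getElem?_set_ne hbj]
      simp [hbj, List.getD_eq_getElem?_getD]
  · simp [hai]

theorem pvSet2d_shape (g : List (List (Option String))) {n : Nat}
    (hg : g.length = n) (hr : ∀ r ∈ g, r.length = n) {a b : Nat} (ha : a < n) (_hb : b < n)
    (v : Option String) :
    (pvSet2d g a b v).length = n ∧ ∀ r ∈ pvSet2d g a b v, r.length = n := by
  unfold pvSet2d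
  constructor
  · simp [hg]
  · intro r hrm
    rcases List.mem_or_eq_of_mem_set hrm with h | rfl
    · exact hr _ h
    · rw [List.length_set]
      have ha' : a < g.length := by omega
      rw [List.getD, List.getElem?_eq_getElem ha']
      exact hr _ (List.getElem_mem ha')

theorem pvFoldSet_cell (path : List (Nat × Nat)) {n : Nat} :
    ∀ g : List (List (Option String)), g.length = n → (∀ r ∈ g, r.length = n) →
    (∀ p ∈ path, p.1 < n ∧ p.2 < n) → ∀ {i j : Nat}, i < n → j < n →
    pvCellG (path.foldl (fun g p => pvSet2d g p.1 p.2 (some "*")) g) i j =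
      if (i, j) ∈ path then some "*" else pvCellG g i j := by
  induction path with
  | nil => intro g _ _ _ i j _ _; simp
  | cons p t ih =>
    intro g hg hr hb i j hi hj
    have hp := hb p (List.mem_cons_self ..)
    have hshape := pvSet2d_shape g hg hr hp.1 hp.2 (some "*")
    rw [List.foldl_cons,
        ih _ hshape.1 hshape.2 (fun q hq => hb q (List.mem_cons_of_mem _ hq)) hi hj,
        pvSet2d_cell g hg hr hp.1 hp.2 hi hj]
    by_cases hmt : (i, j) ∈ t
    · simp [hmt]
    · by_cases hpe : p = (i, j)
      · subst hpe; simp [hmt]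
      · have h1 : ¬(p.1 = i ∧ p.2 = j) := by
          intro ⟨h1, h2⟩; exact hpe (Prod.ext h1 h2)
        have h2 : ¬((i, j) = p) := fun h => hpe h.symm
        simp [hmt, h1, h2]

theorem pvCellG_init (matrix : List (List Int)) (i j : Nat) :
    pvCellG (matrix.map (fun r => r.map (fun _ => (none : Option String)))) i j = none := by
  unfold pvCellG
  simp only [List.getD_eq_getElem?_getD, List.getElem?_map]
  cases h : matrix[i]? with
  | none => simp
  | some r =>
    simp only [Option.map_some, Option.getD_some, List.getElem?_map]
    cases h2 : r[j]? <;> simp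

-- ===== VERDICT (by name: the statement is the Claim_ definition above) =====
theorem find_most_profitable_path_spec : Claim_equal_find_most_profitable_path := by
  intro matrix hdom hpre
  unfold Spec_find_most_profitable_path
  by_cases hn : matrix.length = 0
  · simp [find_most_profitable_path, find_most_profitable_path_alt, hn]
  · have hn0 : 0 < matrix.length := Nat.pos_of_ne_zero hn
    simp only [find_most_profitable_path, find_most_profitable_path_alt, if_neg hn]
    have hfin := pvBuildB_rows matrix matrix.length matrix.length (le_refl _) hn
    rw [hfin]
    simp only [pv_getD_map_range _ (show matrix.length - 1 < matrix.length by omega)]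
    refine Prod.ext ?_ rfl
    have hg0l : (matrix.map (fun r => r.map (fun _ => (none : Option String)))).length =
        matrix.length := by simp
    have hg0r : ∀ r ∈ matrix.map (fun r => r.map (fun _ => (none : Option String))),
        r.length = matrix.length := by
      intro r hr
      rw [List.mem_map] at hr
      obtain ⟨row, hrow, rfl⟩ := hr
      rw [List.length_map]
      exact hpre row hrow
    have hbound : ∀ p ∈ pvTraceA (pvDpA matrix matrix.length) (matrix.length - 1)
        (matrix.length - 1), p.1 < matrix.length ∧ p.2 < matrix.length := by
      intro p hp
      have := pvTraceA_bounds (pvDpA matrix matrix.length) (matrix.length - 1)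
        (matrix.length - 1) p hp
      omega
    apply List.map_congr_left
    intro i hi
    rw [List.mem_range] at hi
    apply List.map_congr_left
    intro j hj
    rw [List.mem_range] at hj
    have hcell := pvFoldSet_cell
      (pvTraceA (pvDpA matrix matrix.length) (matrix.length - 1) (matrix.length - 1))
      (matrix.map (fun r => r.map (fun _ => (none : Option String)))) hg0l hg0r hbound hi hj
    rw [pvCellG_init] at hcell
    unfold pvCellG at hcell
    rw [hcell]
    by_cases hm : (i, j) ∈ pvTraceA (pvDpA matrix matrix.length) (matrix.length - 1)
        (matrix.length - 1)
    · simp [hm, PySem.Set.mem_ofList]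
    · simp [hm, PySem.Set.mem_ofList]
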